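-- pv_equiv track=rewrite | github.com/vaclav0411/algorithms | Задания 14-го спринта/Простые задачи/P. Частичная сортировка.py | partial_sort
-- ===== SOURCE A (Python) =====
-- def partial_sort(array: list):
--     result = []
--     index = array.index(min(array))
--     result.append(array[:index+1])
--
--     max_item = max(array[:index+1])
--     while index < len(array):
--         if array[index] > max_item:
--             result.append([array[index]])
--             max_item = array[index]
--         if array[index] < max_item:
--             result[len(result) - 1].append(array[index])
--         index += 1
--     return len(result)
-- ===== SOURCE B (Python) =====
-- def partial_sort(array: list):
--     index = array.index(min(array))
--     maxes = [max(array[:index + 1])]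
--     for x in array[index:]:
--         maxes.append(max(maxes[-1], x))
--     return len(set(maxes))
-- ===== Notes on version B (the rewrite author's own statement) =====
-- stated objective: alternative
-- what changed: B replaces A's while-loop that builds nested group lists (appending new groups and appending items into the last group) by a cumulative-running-maximum sequence seeded with max(array[:index+1]) and returns the number of distinct values in it via len(set(...)).
import Mathlib
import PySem

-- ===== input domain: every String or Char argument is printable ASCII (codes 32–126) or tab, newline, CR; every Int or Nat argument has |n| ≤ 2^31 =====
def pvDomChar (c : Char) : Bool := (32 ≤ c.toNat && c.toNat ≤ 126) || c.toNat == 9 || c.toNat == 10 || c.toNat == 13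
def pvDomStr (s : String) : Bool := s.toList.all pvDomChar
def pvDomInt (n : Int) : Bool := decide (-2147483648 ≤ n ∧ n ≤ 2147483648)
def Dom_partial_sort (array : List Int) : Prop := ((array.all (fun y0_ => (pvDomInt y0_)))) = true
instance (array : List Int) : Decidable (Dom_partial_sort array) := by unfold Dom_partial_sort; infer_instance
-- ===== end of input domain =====

-- B counts the partial-sort groups as the number of distinct values of the
-- cumulative running-maximum sequence instead of building A's nested group lists.

-- ===== PORT A =====
-- result[len(result)-1].append(x): modify the last group in place
def pvModifyLast (r : List (List Int)) (x : Int) : List (List Int) :=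
  match r with
  | [] => []
  | [g] => [g ++ [x]]
  | g :: rest => g :: pvModifyLast rest x

-- the 'while index < len(array)' loop of A, state = (index, max_item, result)
def pvLoopA (array : List Int) (idx : Nat) (maxItem : Int) (result : List (List Int)) :
    List (List Int) :=
  if h : idx < array.length then
    let x := array[idx]
    let p := if maxItem < x then (result ++ [[x]], x) else (result, maxItem)
    let r2 := if x < p.2 then pvModifyLast p.1 x else p.1
    pvLoopA array (idx + 1) p.2 r2
  else result
termination_by array.length - idx

def partial_sort (array : List Int) : Int :=
  match PySem.List.min? array (fun y => y) with
  | none => 0   -- unreachable under Pre_: Python raises ValueError on []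
  | some m =>
    match PySem.List.index? array m with
    | none => 0 -- unreachable: the minimum is a member
    | some index =>
      let pre := PySem.List.slice array none (some ((index : Int) + 1))
      match PySem.List.max? pre (fun y => y) with
      | none => 0 -- unreachable: pre is nonempty
      | some maxItem => ((pvLoopA array index maxItem [pre]).length : Int)

-- ===== PORT B =====
def partial_sort_alt (array : List Int) : Int :=
  match PySem.List.min? array (fun y => y) with
  | none => 0   -- unreachable under Pre_: Python raises ValueError on []
  | some m =>
    match PySem.List.index? array m with
    | none => 0 -- unreachable: the minimum is a member
    | some index =>
      match PySem.List.max? (PySem.List.slice array none (some ((index : Int) + 1)))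
          (fun y => y) with
      | none => 0 -- unreachable: the prefix is nonempty
      | some seed =>
        let maxes := (PySem.List.slice array (some (index : Int)) none).foldl
          (fun ms x => ms ++ [max ms.getLast! x]) [seed]
        PySem.Set.len (PySem.Set.ofList maxes)

-- ===== PRECONDITION & SPEC =====
-- Pre_ excludes only the empty list, on which Python's min (hence A, and B too) raises ValueError.
def Pre_partial_sort (array : List Int) : Prop := array ≠ []
instance (array : List Int) : Decidable (Pre_partial_sort array) := by
  unfold Pre_partial_sort; infer_instance
def pvWitness_partial_sort : List Int := ([3, 1, 2])

def Spec_partial_sort (array : List Int) (out : Int) : Prop := out = partial_sort_alt array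
instance (array : List Int) (out : Int) : Decidable (Spec_partial_sort array out) := by
  unfold Spec_partial_sort; infer_instance

-- ===== CLAIM (what is proved, stated in full; the proofs are below) =====
def Claim_equal_partial_sort : Prop := ∀ (array : List Int), Dom_partial_sort array → Pre_partial_sort array → Spec_partial_sort array (partial_sort array)

-- ===== LEMMAS AND PROOFS =====

-- number of strict new maxima of l above the running maximum m
def pvCnt : Int → List Int → Nat
  | _, [] => 0
  | m, x :: t => if m < x then 1 + pvCnt x t else pvCnt m t

-- list-structural form of A's loop
def pvLoopL : List Int → Int → List (List Int) → List (List Int)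
  | [], _, r => r
  | x :: t, m, r =>
    let p := if m < x then (r ++ [[x]], x) else (r, m)
    let r2 := if x < p.2 then pvModifyLast p.1 x else p.1
    pvLoopL t p.2 r2

theorem pvModifyLast_length (r : List (List Int)) (x : Int) :
    (pvModifyLast r x).length = r.length := by
  induction r with
  | nil => rfl
  | cons g rest ih =>
    cases rest with
    | nil => rfl
    | cons h t => simpa [pvModifyLast] using ih

theorem pvLoopA_eq_pvLoopL (array : List Int) (idx : Nat) (m : Int) (r : List (List Int)) :
    pvLoopA array idx m r = pvLoopL (array.drop idx) m r := by
  by_cases h : idx < array.length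
  · rw [pvLoopA, List.drop_eq_getElem_cons h]
    simp only [h, dif_pos]
    rw [pvLoopA_eq_pvLoopL array (idx + 1)]
    rfl
  · rw [pvLoopA]
    simp only [h, dif_neg, not_false_iff]
    rw [List.drop_eq_nil_of_le (by omega)]
    rfl
termination_by array.length - idx

theorem pvLoopL_length (l : List Int) (m : Int) (r : List (List Int)) :
    (pvLoopL l m r).length = r.length + pvCnt m l := by
  induction l generalizing m r with
  | nil => rfl
  | cons x t ih =>
    by_cases hx : m < x
    · simp [pvLoopL, hx, ih, pvCnt, List.length_append]
      omega
    · by_cases hlt : x < m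
      · simp [pvLoopL, hx, hlt, ih, pvCnt, pvModifyLast_length]
      · simp [pvLoopL, hx, hlt, ih, pvCnt]

theorem pvGetLast!_concat (ms : List Int) (y : Int) : (ms ++ [y]).getLast! = y := by
  cases ms with
  | nil => rfl
  | cons a t => simp [List.getLast!]

-- B side: the running-maximum tail
def pvTail : Int → List Int → List Int
  | _, [] => []
  | m, x :: t => max m x :: pvTail (max m x) t

theorem pvFoldl_eq_tail (l : List Int) (ms : List Int) (h : ms ≠ []) :
    l.foldl (fun ms x => ms ++ [max ms.getLast! x]) ms = ms ++ pvTail ms.getLast! l := by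
  induction l generalizing ms with
  | nil => simp [pvTail]
  | cons x t ih =>
    simp only [List.foldl_cons]
    rw [ih (ms ++ [max ms.getLast! x]) (by simp)]
    rw [pvGetLast!_concat]
    simp [pvTail]

theorem pvTail_ge (l : List Int) (m z : Int) (hz : z ∈ pvTail m l) : m ≤ z := by
  induction l generalizing m with
  | nil => simp [pvTail] at hz
  | cons x t ih =>
    simp only [pvTail, List.mem_cons] at hz
    rcases hz with h | h
    · simp [h]
    · exact le_trans (le_max_left m x) (ih (max m x) h)

theorem pvFoldl_add_cons (l : List Int) (a : Int) (s : List Int) (ha : a ∉ l) :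
    l.foldl PySem.Set.add (a :: s) = a :: l.foldl PySem.Set.add s := by
  induction l generalizing s with
  | nil => rfl
  | cons x t ih =>
    have hxa : ¬ x = a := fun h => ha (by simp [h])
    have ha' : a ∉ t := fun h => ha (List.mem_cons_of_mem _ h)
    by_cases hs : x ∈ s
    · simp [PySem.Set.add, PySem.Set.contains, hs, hxa, ih _ ha']
    · simp [PySem.Set.add, PySem.Set.contains, hs, hxa, List.cons_append, ih _ ha']

theorem pvOfList_cons_not_mem (a : Int) (l : List Int) (ha : a ∉ l) :
    PySem.Set.ofList (a :: l) = a :: PySem.Set.ofList l := by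
  show List.foldl PySem.Set.add PySem.Set.empty (a :: l) = _
  rw [List.foldl_cons]
  have : PySem.Set.add PySem.Set.empty a = [a] := rfl
  rw [this]
  exact pvFoldl_add_cons l a [] ha

theorem pvOfList_cons_dup (a : Int) (l : List Int) :
    PySem.Set.ofList (a :: a :: l) = PySem.Set.ofList (a :: l) := by
  show List.foldl PySem.Set.add PySem.Set.empty (a :: a :: l)
      = List.foldl PySem.Set.add PySem.Set.empty (a :: l)
  simp [PySem.Set.add, PySem.Set.empty, PySem.Set.contains]

theorem pvOfList_tail_length (l : List Int) (m : Int) :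
    (PySem.Set.ofList (m :: pvTail m l)).length = 1 + pvCnt m l := by
  induction l generalizing m with
  | nil => rfl
  | cons x t ih =>
    by_cases hx : m < x
    · have hmax : max m x = x := max_eq_right (le_of_lt hx)
      have hnm : m ∉ x :: pvTail x t := by
        intro hmem
        rcases List.mem_cons.mp hmem with h | h
        · omega
        · have := pvTail_ge t x m h; omega
      rw [show pvTail m (x :: t) = x :: pvTail x t by simp [pvTail, hmax]]
      rw [pvOfList_cons_not_mem m _ hnm]
      simp only [List.length_cons, ih x]
      simp [pvCnt, hx]
      omega
    · have hmax : max m x = m := max_eq_left (by omega)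
      rw [show pvTail m (x :: t) = m :: pvTail m t by simp [pvTail, hmax]]
      rw [pvOfList_cons_dup]
      rw [ih m]
      simp [pvCnt, hx]

-- the crux: both ports compute 1 + pvCnt seed (array.drop index)
theorem partial_sort_eq (array : List Int) :
    partial_sort array = partial_sort_alt array := by
  unfold partial_sort partial_sort_alt
  cases hmin : PySem.List.min? array (fun y => y) with
  | none => rfl
  | some m =>
    cases hidx : PySem.List.index? array m with
    | none => simp only [hidx]
    | some index =>
      cases hmax : PySem.List.max? (PySem.List.slice array none (some ((index : Int) + 1)))
          (fun y => y) with
      | none => simp only [hidx, hmax]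
      | some seed =>
        simp only [hidx, hmax]
        -- A side
        rw [pvLoopA_eq_pvLoopL, pvLoopL_length]
        -- B side
        rw [PySem.List.slice_from_natCast]
        rw [pvFoldl_eq_tail (array.drop index) [seed] (by simp)]
        have : ([seed] : List Int).getLast! = seed := rfl
        rw [this, List.singleton_append]
        show ((1 + pvCnt seed (array.drop index) : Nat) : Int)
            = PySem.Set.len (PySem.Set.ofList (seed :: pvTail seed (array.drop index)))
        rw [PySem.Set.len, pvOfList_tail_length]

-- ===== VERDICT (by name: the statement is the Claim_ definition above) =====
theorem partial_sort_spec : Claim_equal_partial_sort := by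
  intro array _ _
  unfold Spec_partial_sort
  exact partial_sort_eq array
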